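-- pv_equiv track=rewrite | github.com/ltfide/hackerrank-problem-solving | Problem Solvings/script.py | pickNumber
-- ===== SOURCE A (Python) =====
-- def pickNumber(a) :
--    unik = sorted(set(a))
--    n_max = max([a.count(bill) for bill in unik])
--
--    for x,y in zip(unik[:-1], unik[1:]):
--       if abs(x-y) not in (0, 1):
--          continue
--       n = a.count(x) + a.count(y)
--       n_max = max(n_max, n)
--    return n_max
-- ===== SOURCE B (Python) =====
-- def pickNumber(a):
--     cnt = {}
--     for x in a:
--         cnt[x] = cnt.get(x, 0) + 1
--     return max(c + cnt.get(k + 1, 0) for k, c in cnt.items())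
-- ===== Notes on version B (the rewrite author's own statement) =====
-- stated objective: faster
-- what changed: B builds a count dictionary in one pass and takes the max of cnt[k]+cnt.get(k+1,0) over its keys, replacing A's repeated a.count scans and the sorted-adjacent-pair loop.
import Mathlib
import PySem

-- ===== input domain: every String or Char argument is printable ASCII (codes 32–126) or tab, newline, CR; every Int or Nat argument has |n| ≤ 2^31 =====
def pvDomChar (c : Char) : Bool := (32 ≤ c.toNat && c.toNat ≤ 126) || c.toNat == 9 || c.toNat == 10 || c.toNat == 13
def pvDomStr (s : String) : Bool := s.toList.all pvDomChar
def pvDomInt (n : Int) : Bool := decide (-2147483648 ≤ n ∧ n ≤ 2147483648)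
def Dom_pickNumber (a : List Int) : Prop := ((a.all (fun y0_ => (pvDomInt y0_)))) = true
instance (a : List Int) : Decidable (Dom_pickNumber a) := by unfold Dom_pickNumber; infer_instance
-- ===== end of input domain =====

-- B replaces A's repeated a.count scans over sorted unique values by a one-pass count
-- dictionary and a single max over its keys (faster; asymptotic: O(n*u) -> O(n+u)).

-- ===== PORT A =====
def pickNumber (a : List Int) : Int :=
  let unik := PySem.List.sorted (PySem.Set.ofList a) (fun x => x) false
  let n_max : Int :=
    match PySem.List.max? (unik.map (fun bill => (PySem.List.count a bill : Int))) (fun x => x) with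
    | some m => m
    | none => 0   -- Python: max([]) raises ValueError; excluded by Pre_
  (List.zip (PySem.List.slice unik none (some (-1))) (PySem.List.slice unik (some 1) none)).foldl
    (fun nm xy =>
      if !(|xy.1 - xy.2| == 0 || |xy.1 - xy.2| == 1) then nm
      else max nm ((PySem.List.count a xy.1 : Int) + (PySem.List.count a xy.2 : Int)))
    n_max

-- ===== PORT B =====
def pickNumber_alt (a : List Int) : Int :=
  let cnt := a.foldl (fun d x => d.insert x (d.getD x 0 + 1)) PySem.Dict.empty
  match PySem.List.max? (cnt.items.map (fun kc => kc.2 + cnt.getD (kc.1 + 1) 0)) (fun x => x) with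
  | some m => m
  | none => 0   -- Python: max(empty generator) raises ValueError; excluded by Pre_

-- ===== PRECONDITION & SPEC =====
-- Pre_ excludes only the empty list, on which Python A raises ValueError (max of empty list).
def Pre_pickNumber (a : List Int) : Prop := a ≠ []
instance (a : List Int) : Decidable (Pre_pickNumber a) := by unfold Pre_pickNumber; infer_instance
def pvWitness_pickNumber : List Int := [1, 2, 2]

def Spec_pickNumber (a : List Int) (out : Int) : Prop := out = pickNumber_alt a
instance (a : List Int) (out : Int) : Decidable (Spec_pickNumber a out) := by unfold Spec_pickNumber; infer_instance

-- ===== CLAIM (what is proved, stated in full; the proofs are below) =====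
def Claim_equal_pickNumber : Prop := ∀ (a : List Int), Dom_pickNumber a → Pre_pickNumber a → Spec_pickNumber a (pickNumber a)

-- ===== LEMMAS AND PROOFS =====

-- running max: bounds and membership
theorem le_foldlMax (xs : List Int) (x : Int) : x ≤ xs.foldl max x := by
  induction xs generalizing x with
  | nil => simp
  | cons y t ih => exact le_trans (le_max_left x y) (ih (max x y))

theorem mem_le_foldlMax (xs : List Int) (x : Int) : ∀ z ∈ xs, z ≤ xs.foldl max x := by
  induction xs generalizing x with
  | nil => simp
  | cons y t ih =>
    intro z hz
    rcases List.mem_cons.mp hz with h | h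
    · subst h; exact le_trans (le_max_right x z) (le_foldlMax t (max x z))
    · exact ih (max x y) z h

theorem foldlMax_mem (xs : List Int) (x : Int) : xs.foldl max x = x ∨ xs.foldl max x ∈ xs := by
  induction xs generalizing x with
  | nil => simp
  | cons y t ih =>
    rcases ih (max x y) with h | h
    · rcases max_choice x y with he | he
      · left; rw [List.foldl_cons, h, he]
      · right; rw [List.foldl_cons, h, he]; exact List.mem_cons_self
    · right; exact List.mem_cons_of_mem _ h

-- two running maxes agree when each candidate list dominates the other
theorem foldlMax_eq_of_dominate (x y : Int) (xs ys : List Int)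
    (h1 : ∀ z ∈ x :: xs, ∃ w ∈ y :: ys, z ≤ w)
    (h2 : ∀ w ∈ y :: ys, ∃ z ∈ x :: xs, w ≤ z) :
    xs.foldl max x = ys.foldl max y := by
  have hb1 : ∀ z ∈ x :: xs, z ≤ ys.foldl max y := by
    intro z hz
    obtain ⟨w, hw, hzw⟩ := h1 z hz
    rcases List.mem_cons.mp hw with h | h
    · exact le_trans hzw (h ▸ le_foldlMax ys y)
    · exact le_trans hzw (mem_le_foldlMax ys y w h)
  have hb2 : ∀ w ∈ y :: ys, w ≤ xs.foldl max x := by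
    intro w hw
    obtain ⟨z, hz, hwz⟩ := h2 w hw
    rcases List.mem_cons.mp hz with h | h
    · exact le_trans hwz (h ▸ le_foldlMax xs x)
    · exact le_trans hwz (mem_le_foldlMax xs x z h)
  apply le_antisymm
  · rcases foldlMax_mem xs x with h | h
    · rw [h]; exact hb1 x (List.mem_cons_self)
    · exact hb1 _ (List.mem_cons_of_mem _ h)
  · rcases foldlMax_mem ys y with h | h
    · rw [h]; exact hb2 y (List.mem_cons_self)
    · exact hb2 _ (List.mem_cons_of_mem _ h)

-- the guarded fold is a running max over the filtered, mapped list
theorem foldl_ifnot_max {α : Type} (b : α → Bool) (g : α → Int) (l : List α) (i : Int) :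
    l.foldl (fun acc x => if !(b x) then acc else max acc (g x)) i
      = ((l.filter (fun x => b x)).map g).foldl max i := by
  induction l generalizing i with
  | nil => rfl
  | cons x t ih =>
    simp only [Bool.not_eq_true'] at ih ⊢
    by_cases hb : b x = true
    · simp [List.foldl_cons, hb, ih]
    · simp only [Bool.not_eq_true] at hb
      simp [List.foldl_cons, hb, ih]

-- zipping l[:-1] with l[1:] is zipping l with its tail
theorem zip_dropLast_left {α β : Type} (r : List β) (l : List α) (h : r.length < l.length) :
    List.zip l.dropLast r = List.zip l r := by
  induction r generalizing l with
  | nil => simp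
  | cons b r' ih =>
    match l with
    | [] => simp at h
    | [c] => simp at h
    | c :: c' :: l' =>
      have h' : r'.length < (c' :: l').length := by
        simpa using Nat.lt_of_succ_lt_succ h
      simp only [List.dropLast_cons_of_ne_nil (by simp : (c' :: l') ≠ []), List.zip_cons_cons]
      rw [ih (c' :: l') h']

theorem zip_dropLast_tail {α : Type} (l : List α) :
    List.zip l.dropLast l.tail = List.zip l l.tail := by
  match l with
  | [] => rfl
  | [x] => rfl
  | x :: y :: t =>
    exact zip_dropLast_left (y :: t) (x :: y :: t) (by simp)

-- adjacent pairs of a strictly increasing list: members, and increasing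
theorem mem_zip_tail_facts {u : List Int} (hpw : u.Pairwise (· < ·)) :
    ∀ pq ∈ List.zip u u.tail, pq.1 ∈ u ∧ pq.2 ∈ u ∧ pq.1 < pq.2 := by
  induction u with
  | nil => simp
  | cons x rest ih =>
    match rest with
    | [] => simp
    | r :: rest2 =>
      intro pq hpq
      simp only [List.tail_cons, List.zip_cons_cons] at hpq
      rcases List.mem_cons.mp hpq with h | h
      · subst h
        refine ⟨List.mem_cons_self, List.mem_cons_of_mem _ List.mem_cons_self, ?_⟩
        exact (List.pairwise_cons.mp hpw).1 r List.mem_cons_self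
      · have h' : pq ∈ List.zip (r :: rest2) (r :: rest2).tail := by simpa using h
        have := ih (List.pairwise_cons.mp hpw).2 pq h'
        exact ⟨List.mem_cons_of_mem _ this.1, List.mem_cons_of_mem _ this.2.1, this.2.2⟩

-- converse: k and k+1 both present in a strictly increasing list are adjacent
theorem succ_pair_mem_zip_tail {u : List Int} (hpw : u.Pairwise (· < ·))
    {k : Int} (hk : k ∈ u) (hk1 : k + 1 ∈ u) :
    (k, k + 1) ∈ List.zip u u.tail := by
  induction u with
  | nil => simp at hk
  | cons x rest ih =>
    have hx := List.pairwise_cons.mp hpw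
    by_cases hkx : k = x
    · subst hkx
      have hk1r : k + 1 ∈ rest := by
        rcases List.mem_cons.mp hk1 with h | h
        · omega
        · exact h
      match rest, hk1r with
      | r :: rest2, hk1r =>
        have hr : r = k + 1 := by
          have h1 : k < r := hx.1 r List.mem_cons_self
          rcases List.mem_cons.mp hk1r with h | h
          · omega
          · have := (List.pairwise_cons.mp hx.2).1 (k + 1) h
            omega
        simp [List.zip_cons_cons, hr]
    · have hkr : k ∈ rest := by
        rcases List.mem_cons.mp hk with h | h
        · exact absurd h hkx
        · exact h
      have hk1r : k + 1 ∈ rest := by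
        rcases List.mem_cons.mp hk1 with h | h
        · have := hx.1 k hkr; omega
        · exact h
      have hrec := ih hx.2 hkr hk1r
      match rest, hrec with
      | r :: rest2, hrec =>
        simp only [List.tail_cons, List.zip_cons_cons]
        refine List.mem_cons_of_mem _ ?_
        simpa using hrec

-- ===== VERDICT (by name: the statement is the Claim_ definition above) =====
theorem pickNumber_spec : Claim_equal_pickNumber := by
  intro a _ hpre
  unfold Spec_pickNumber
  -- basic sets
  have hSne : PySem.Set.ofList a ≠ [] := by
    match a, hpre with
    | x :: r, _ => exact List.ne_nil_of_mem ((PySem.Set.mem_ofList (x :: r) x).mpr List.mem_cons_self)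
  have hune : PySem.List.sorted (PySem.Set.ofList a) (fun x => x) false ≠ [] := by
    intro hnil
    exact hSne ((PySem.List.sorted_eq_nil_iff (PySem.Set.ofList a) (fun x => x) false).mp hnil)
  rcases hu : PySem.List.sorted (PySem.Set.ofList a) (fun x => x) false with _ | ⟨h, t⟩
  · exact absurd hu hune
  rcases hS : PySem.Set.ofList a with _ | ⟨s, S'⟩
  · exact absurd hS hSne
  have hA : pickNumber a =
      ((t.map (fun k => (List.count k a : Int))) ++
        (((List.zip (h :: t) t).filter
            (fun pq => (|pq.1 - pq.2| == 0 || |pq.1 - pq.2| == 1))).map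
          (fun pq => ((List.count pq.1 a : Int) + (List.count pq.2 a : Int))))).foldl max
        ((List.count h a : Int)) := by
    simp only [pickNumber]
    rw [hu]
    rw [PySem.List.slice_to_neg_one, PySem.List.slice_from_one]
    rw [zip_dropLast_tail (h :: t), List.tail_cons]
    rw [List.map_cons, PySem.List.max?_id_cons]
    rw [foldl_ifnot_max (fun pq : Int × Int => (|pq.1 - pq.2| == 0 || |pq.1 - pq.2| == 1))
        (fun pq : Int × Int => ((PySem.List.count a pq.1 : Int) + (PySem.List.count a pq.2 : Int)))]
    rw [← List.foldl_append]
    simp only [PySem.List.count_eq]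
  have hB : pickNumber_alt a =
      (S'.map (fun k => (List.count k a : Int) + (List.count (k + 1) a : Int))).foldl max
        ((List.count s a : Int) + (List.count (s + 1) a : Int)) := by
    simp only [pickNumber_alt, PySem.Dict.foldl_insert_getD_add_one_eq_counter,
      PySem.Dict.items_counter, List.map_map, Function.comp_def, PySem.Dict.getD_counter]
    rw [hS, List.map_cons, PySem.List.max?_id_cons]
  rw [hA, hB]
  have hpw : (h :: t).Pairwise (· < ·) := by
    have hp := PySem.List.sorted_ofList_pairwise_lt a
    rwa [hu] at hp
  have hmemu : ∀ k : Int, k ∈ h :: t ↔ k ∈ a := by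
    intro k
    rw [← hu, PySem.List.mem_sorted, PySem.Set.mem_ofList]
  have hmemS : ∀ k : Int, k ∈ s :: S' ↔ k ∈ a := by
    intro k; rw [← hS, PySem.Set.mem_ofList]
  apply foldlMax_eq_of_dominate
  · -- every A-side candidate is at most some B-side candidate
    intro z hz
    have hz' : z ∈ (h :: t).map (fun k => (List.count k a : Int)) ∨
        z ∈ (((h :: t).zip t).filter
              (fun pq => (|pq.1 - pq.2| == 0 || |pq.1 - pq.2| == 1))).map
            (fun pq => ((List.count pq.1 a : Int) + (List.count pq.2 a : Int))) := by
      rcases List.mem_cons.mp hz with h1 | h1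
      · left; rw [h1, List.map_cons]; exact List.mem_cons_self
      · rcases List.mem_append.mp h1 with h2 | h2
        · left; exact List.mem_cons_of_mem _ h2
        · right; exact h2
    rcases hz' with h1 | h1
    · obtain ⟨k, hk, hzk⟩ := List.mem_map.mp h1
      have hkS : k ∈ s :: S' := (hmemS k).mpr ((hmemu k).mp hk)
      refine ⟨(List.count k a : Int) + (List.count (k + 1) a : Int), ?_, ?_⟩
      · have := List.mem_map_of_mem (l := s :: S')
          (f := fun k => (List.count k a : Int) + (List.count (k + 1) a : Int)) hkS
        simpa using this
      · rw [← hzk]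
        exact le_add_of_nonneg_right (Int.natCast_nonneg _)
    · obtain ⟨pq, hpq, hzpq⟩ := List.mem_map.mp h1
      obtain ⟨hpqz, hcond⟩ := List.mem_filter.mp hpq
      obtain ⟨hp1, hp2, hplt⟩ := mem_zip_tail_facts hpw pq (by simpa using hpqz)
      have habs : |pq.1 - pq.2| = pq.2 - pq.1 := by
        rw [abs_sub_comm]; exact abs_of_nonneg (by omega)
      have hq : pq.2 = pq.1 + 1 := by
        simp only [habs, Bool.or_eq_true, beq_iff_eq] at hcond
        omega
      have hkS : pq.1 ∈ s :: S' := (hmemS pq.1).mpr ((hmemu pq.1).mp hp1)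
      refine ⟨(List.count pq.1 a : Int) + (List.count (pq.1 + 1) a : Int), ?_, ?_⟩
      · have := List.mem_map_of_mem (l := s :: S')
          (f := fun k => (List.count k a : Int) + (List.count (k + 1) a : Int)) hkS
        simpa using this
      · rw [← hzpq, hq]
  · -- every B-side candidate is at most some A-side candidate
    intro w hw
    have hw' : w ∈ (s :: S').map (fun k => (List.count k a : Int) + (List.count (k + 1) a : Int)) := by
      simpa using hw
    obtain ⟨k, hk, hwk⟩ := List.mem_map.mp hw'
    have hku : k ∈ h :: t := (hmemu k).mpr ((hmemS k).mp hk)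
    by_cases hk1 : (k + 1) ∈ a
    · have hk1u : k + 1 ∈ h :: t := (hmemu (k + 1)).mpr hk1
      have hpair : (k, k + 1) ∈ (h :: t).zip t := by
        simpa using succ_pair_mem_zip_tail hpw hku hk1u
      have hcond : ((fun pq : Int × Int => (|pq.1 - pq.2| == 0 || |pq.1 - pq.2| == 1)) (k, k + 1)) = true := by
        simp
      refine ⟨(List.count k a : Int) + (List.count (k + 1) a : Int), ?_, ?_⟩
      · refine List.mem_cons_of_mem _ (List.mem_append.mpr (Or.inr ?_))
        exact List.mem_map.mpr ⟨(k, k + 1), List.mem_filter.mpr ⟨hpair, hcond⟩, rfl⟩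
      · rw [← hwk]
    · have hc0 : List.count (k + 1) a = 0 := List.count_eq_zero.mpr hk1
      refine ⟨(List.count k a : Int), ?_, ?_⟩
      · rcases List.mem_cons.mp hku with h1 | h1
        · rw [h1]; exact List.mem_cons_self
        · exact List.mem_cons_of_mem _
            (List.mem_append.mpr (Or.inl (List.mem_map_of_mem (f := fun k => (List.count k a : Int)) h1)))
      · rw [← hwk, hc0]; simp
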